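-- pv_equiv track=rewrite | github.com/alex2704/Task4ReDone | Task4_reDone.py | ChooseNumbers
-- ===== SOURCE A (Python) =====
-- def ChooseNumbers(str):
--     mylist = list()
--     line = ""
--     i = 0
--     while i < len(str):
--         if str[i].isdigit():
--             while i < len(str) and str[i].isdigit():
--                 line += str[i]
--                 i += 1
--             if i < len(str) and ((str[i] == '.' and line.find('.') == -1 and line.find(',') == -1) or \
--                     (str[i]==',' and line.find(',') == -1 and line.find('.') == -1)):
--                 if i < len(str)-1:
--                     if str[i+1].isdigit():
--                         line+=str[i]
--                 i+=1
--             while i < len(str) and str[i].isdigit():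
--                 line += str[i]
--                 i+=1
--         else:
--             i+=1
--             #
--         if line!="":
--             mylist.append(line)
--         line = ""
--     return mylist
-- ===== SOURCE B (Python) =====
-- def ChooseNumbers(str):
--     # Split into maximal runs of digit / non-digit chars, then scan the runs:
--     # a digit run followed by a single '.' or ',' run and another digit run
--     # forms one token; otherwise a digit run is a token by itself.
--     runs = []
--     i = 0
--     n = len(str)
--     while i < n:
--         j = i + 1
--         while j < n and str[j].isdigit() == str[i].isdigit():
--             j += 1
--         runs.append(str[i:j])
--         i = j
--     out = []
--     k = 0
--     while k < len(runs):
--         r = runs[k]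
--         if r[0].isdigit():
--             if k + 2 < len(runs) and runs[k + 1] in ('.', ',') and runs[k + 2][0].isdigit():
--                 out.append(r + runs[k + 1] + runs[k + 2])
--                 k += 3
--             else:
--                 out.append(r)
--                 k += 1
--         else:
--             k += 1
--     return out
-- ===== Notes on version B (the rewrite author's own statement) =====
-- stated objective: alternative
-- what changed: A interleaves index-mutating nested while loops (digit collection, separator peeking with find() checks, second digit collection) over one running index; B first splits the string into maximal digit/non-digit runs and then scans the run list with a two-run lookahead, joining a digit run, a single '.'/',' run and a following digit run into one token.
import Mathlib
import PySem

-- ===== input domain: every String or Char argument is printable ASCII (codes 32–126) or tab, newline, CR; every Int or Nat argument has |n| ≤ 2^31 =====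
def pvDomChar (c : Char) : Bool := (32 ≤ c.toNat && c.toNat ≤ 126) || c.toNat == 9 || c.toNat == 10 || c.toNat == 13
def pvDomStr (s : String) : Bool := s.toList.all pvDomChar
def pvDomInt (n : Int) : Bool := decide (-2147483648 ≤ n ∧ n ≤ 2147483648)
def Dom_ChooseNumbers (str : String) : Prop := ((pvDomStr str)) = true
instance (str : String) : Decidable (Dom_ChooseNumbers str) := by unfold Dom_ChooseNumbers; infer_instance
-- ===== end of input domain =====

-- B replaces A's index-juggling while loops by a run-decomposition (maximal digit/non-digit
-- runs) followed by a three-run lookahead scan; objective: simpler, same O(n) cost.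

-- ===== PORT A =====
-- inner `while i < len(str) and str[i].isdigit(): line += str[i]; i += 1`
def collectA (line : List Char) : List Char → List Char × List Char
  | [] => (line, [])
  | c :: rest => if c.isDigit then collectA (line ++ [c]) rest else (line, c :: rest)

-- the separator block between the two digit-collecting whiles (returns (line, suffix after i))
def afterSep (line1 : List Char) (s1 : List Char) : List Char × List Char :=
  match s1 with
  | [] => (line1, [])
  | d :: rest1 =>
    -- `line.find('.') == -1` says exactly that '.' does not occur in line
    if (d = '.' ∧ '.' ∉ line1 ∧ ',' ∉ line1) ∨
       (d = ',' ∧ ',' ∉ line1 ∧ '.' ∉ line1) then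
      -- `if i < len(str)-1: if str[i+1].isdigit(): line += str[i]`; then `i += 1`
      match rest1 with
      | [] => (line1, rest1)
      | e :: _ => (if e.isDigit then line1 ++ [d] else line1, rest1)
    else (line1, s1)

theorem collectA_len (line : List Char) (s : List Char) : (collectA line s).2.length ≤ s.length := by
  induction s generalizing line with
  | nil => simp [collectA]
  | cons c rest ih =>
    simp only [collectA]
    split
    · exact le_trans (ih _) (Nat.le_succ _)
    · simp

theorem afterSep_len (line1 s1 : List Char) : (afterSep line1 s1).2.length ≤ s1.length := by
  cases s1 with
  | nil => simp [afterSep]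
  | cons d rest1 =>
    simp only [afterSep]
    split
    · cases rest1 <;> simp
    · simp

-- outer `while i < len(str)` of A, over the remaining suffix
def loopA : List Char → List (List Char)
  | [] => []
  | c :: rest =>
    if c.isDigit then
      let p1 := collectA [] (c :: rest)
      let p2 := afterSep p1.1 p1.2
      let p3 := collectA p2.1 p2.2
      if p3.1 ≠ [] then p3.1 :: loopA p3.2 else loopA p3.2
    else loopA rest
termination_by s => s.length
decreasing_by
  all_goals
    first
    | (show _ < (c :: rest).length
       calc (collectA (afterSep (collectA [] (c :: rest)).1 (collectA [] (c :: rest)).2).1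
               (afterSep (collectA [] (c :: rest)).1 (collectA [] (c :: rest)).2).2).2.length
           ≤ (afterSep (collectA [] (c :: rest)).1 (collectA [] (c :: rest)).2).2.length :=
             collectA_len _ _
         _ ≤ (collectA [] (c :: rest)).2.length := afterSep_len _ _
         _ ≤ rest.length := by simp only [collectA, *, if_pos]; exact collectA_len _ _
         _ < (c :: rest).length := by simp)
    | simp

def ChooseNumbers (str : String) : List String :=
  (loopA str.toList).map String.ofList

-- ===== PORT B =====
-- maximal runs of chars with equal `isdigit` (the two grouping whiles of B)
def runsB : List Char → List (List Char)
  | [] => []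
  | c :: rest =>
    (c :: rest.takeWhile (fun d => d.isDigit == c.isDigit)) ::
      runsB (rest.dropWhile (fun d => d.isDigit == c.isDigit))
termination_by s => s.length
decreasing_by
  exact Nat.lt_succ_of_le (List.length_dropWhile_le _ _)

def headDigit : List Char → Bool
  | [] => false
  | c :: _ => c.isDigit

-- B's scan over the runs with two-run lookahead
def scanRuns : List (List Char) → List (List Char)
  | [] => []
  | r :: s :: t :: rest' =>
    if headDigit r then
      if (s == ['.'] || s == [',']) && headDigit t then
        (r ++ s ++ t) :: scanRuns rest'
      else r :: scanRuns (s :: t :: rest')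
    else scanRuns (s :: t :: rest')
  | r :: rest =>
    if headDigit r then r :: scanRuns rest else scanRuns rest
termination_by rs => rs.length
decreasing_by all_goals (simp only [List.length_cons]; omega)

def ChooseNumbers_alt (str : String) : List String :=
  (scanRuns (runsB str.toList)).map String.ofList

-- ===== PRECONDITION & SPEC =====
def Spec_ChooseNumbers (str : String) (out : List String) : Prop := out = ChooseNumbers_alt str
instance (str : String) (out : List String) : Decidable (Spec_ChooseNumbers str out) := by unfold Spec_ChooseNumbers; infer_instance

-- ===== CLAIM (what is proved, stated in full; the proofs are below) =====
def Claim_equal_ChooseNumbers : Prop := ∀ (str : String), Dom_ChooseNumbers str → Spec_ChooseNumbers str (ChooseNumbers str)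

-- ===== LEMMAS AND PROOFS =====

theorem collectA_eq (line s : List Char) :
    collectA line s = (line ++ s.takeWhile Char.isDigit, s.dropWhile Char.isDigit) := by
  induction s generalizing line with
  | nil => simp [collectA]
  | cons c rest ih =>
    by_cases hc : c.isDigit = true
    · simp [collectA, hc, ih]
    · simp [collectA, hc]

theorem dropWhile_head_not {p : Char → Bool} {s : List Char} :
    ∀ {d : Char} {rest1 : List Char}, s.dropWhile p = d :: rest1 → p d = false := by
  induction s with
  | nil => intro d r h; simp at h
  | cons c cs ih =>
    intro d r h
    by_cases hc : p c = true
    · rw [List.dropWhile_cons_of_pos hc] at h; exact ih h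
    · rw [List.dropWhile_cons_of_neg hc] at h
      injection h with h1 _
      subst h1
      simpa using hc

theorem runsB_cons (c : Char) (rest : List Char) :
    runsB (c :: rest) =
      (c :: rest.takeWhile (fun d => d.isDigit == c.isDigit)) ::
        runsB (rest.dropWhile (fun d => d.isDigit == c.isDigit)) := by
  simp [runsB]

theorem loopA_nil : loopA [] = [] := by simp [loopA]

theorem scan_drop (s : List Char) (rs : List (List Char)) (hs : headDigit s = false) :
    scanRuns (s :: rs) = scanRuns rs := by
  match rs with
  | [] => simp [scanRuns, hs]
  | [a] => simp [scanRuns, hs]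
  | a :: b :: rs' => simp [scanRuns, hs]

theorem scan_cons_noattach (r s : List Char) (rs : List (List Char)) (hr : headDigit r = true)
    (h1 : s ≠ ['.']) (h2 : s ≠ [',']) :
    scanRuns (r :: s :: rs) = r :: scanRuns (s :: rs) := by
  match rs with
  | [] => simp [scanRuns, hr]
  | t :: rs' => simp [scanRuns, hr, h1, h2]

theorem scan_runs_dropWhile (rest : List Char) :
    scanRuns (runsB (rest.dropWhile (fun d => d.isDigit == false))) = scanRuns (runsB rest) := by
  cases rest with
  | nil => rfl
  | cons d r' =>
    by_cases hd : d.isDigit = true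
    · rw [List.dropWhile_cons_of_neg (by simp [hd])]
    · have hdf : d.isDigit = false := by simpa using hd
      rw [List.dropWhile_cons_of_pos (by simp [hdf])]
      rw [runsB_cons, scan_drop _ _ (by simp [headDigit, hdf])]
      simp [hdf]

theorem scan_skip (c : Char) (rest : List Char) (hc : c.isDigit = false) :
    scanRuns (runsB (c :: rest)) = scanRuns (runsB rest) := by
  rw [runsB_cons, scan_drop _ _ (by simp [headDigit, hc])]
  have hpred : (fun d : Char => d.isDigit == c.isDigit) = (fun d : Char => d.isDigit == false) := by
    simp [hc]
  rw [hpred]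
  exact scan_runs_dropWhile rest

theorem main_equiv (n : Nat) : ∀ (s : List Char), s.length ≤ n → loopA s = scanRuns (runsB s) := by
  induction n with
  | zero =>
    intro s hs
    have h0 : s = [] := List.length_eq_zero_iff.mp (Nat.le_zero.mp hs)
    subst h0
    simp [loopA_nil, runsB, scanRuns]
  | succ n ih =>
    intro s hs
    cases s with
    | nil => simp [loopA_nil, runsB, scanRuns]
    | cons c rest =>
      have hrest : rest.length ≤ n := by simpa using hs
      by_cases hc : c.isDigit = true
      case neg =>
        have hcf : c.isDigit = false := by simpa using hc
        rw [scan_skip c rest hcf]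
        have hstep : loopA (c :: rest) = loopA rest := by simp [loopA, hcf]
        rw [hstep]
        exact ih rest hrest
      case pos =>
        have hcol : collectA [] (c :: rest) =
            (c :: rest.takeWhile Char.isDigit, rest.dropWhile Char.isDigit) := by
          rw [collectA_eq]
          simp [hc]
        have hrb : runsB (c :: rest) =
            (c :: rest.takeWhile Char.isDigit) :: runsB (rest.dropWhile Char.isDigit) := by
          rw [runsB_cons]; simp [hc]
        have hloop : loopA (c :: rest) =
            (if (collectA (afterSep (c :: rest.takeWhile Char.isDigit) (rest.dropWhile Char.isDigit)).1
                   (afterSep (c :: rest.takeWhile Char.isDigit) (rest.dropWhile Char.isDigit)).2).1 ≠ [] then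
               (collectA (afterSep (c :: rest.takeWhile Char.isDigit) (rest.dropWhile Char.isDigit)).1
                   (afterSep (c :: rest.takeWhile Char.isDigit) (rest.dropWhile Char.isDigit)).2).1 ::
                 loopA (collectA (afterSep (c :: rest.takeWhile Char.isDigit) (rest.dropWhile Char.isDigit)).1
                   (afterSep (c :: rest.takeWhile Char.isDigit) (rest.dropWhile Char.isDigit)).2).2
             else loopA (collectA (afterSep (c :: rest.takeWhile Char.isDigit) (rest.dropWhile Char.isDigit)).1
                   (afterSep (c :: rest.takeWhile Char.isDigit) (rest.dropWhile Char.isDigit)).2).2) := by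
          simp only [loopA, hc, if_true, hcol]
        have hmem : ∀ x ∈ c :: rest.takeWhile Char.isDigit, x.isDigit = true := by
          intro x hx
          rcases List.mem_cons.mp hx with h | h
          · subst h; exact hc
          · exact List.mem_takeWhile_imp h
        have hdot : '.' ∉ c :: rest.takeWhile Char.isDigit := by
          intro h; simpa using hmem _ h
        have hcom : ',' ∉ c :: rest.takeWhile Char.isDigit := by
          intro h; simpa using hmem _ h
        have hhd : headDigit (c :: rest.takeWhile Char.isDigit) = true := hc
        have hdlen := List.length_dropWhile_le (p := Char.isDigit) (l := rest)
        rcases hseq : rest.dropWhile Char.isDigit with _ | ⟨d, rest1⟩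
        · -- rest2 = []
          rw [hseq] at hloop
          rw [hseq] at hrb
          rw [hloop, hrb]
          simp [afterSep, collectA, loopA_nil, scanRuns, hhd, runsB]
        · -- rest2 = d :: rest1
          rw [hseq] at hloop
          rw [hseq] at hrb
          rw [hloop, hrb]
          have hd : d.isDigit = false := dropWhile_head_not hseq
          have hlen1 : (d :: rest1).length ≤ n := le_trans (hseq ▸ hdlen) hrest
          by_cases hsep : d = '.' ∨ d = ','
          · -- d is a separator; sep condition of A holds
            have hcondT : ((d = '.' ∧ '.' ∉ c :: rest.takeWhile Char.isDigit ∧ ',' ∉ c :: rest.takeWhile Char.isDigit) ∨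
                (d = ',' ∧ ',' ∉ c :: rest.takeWhile Char.isDigit ∧ '.' ∉ c :: rest.takeWhile Char.isDigit)) := by
              rcases hsep with h | h
              · exact Or.inl ⟨h, hdot, hcom⟩
              · exact Or.inr ⟨h, hcom, hdot⟩
            have hsd : [d] = ['.'] ∨ [d] = [','] := by
              rcases hsep with h | h
              · exact Or.inl (by rw [h])
              · exact Or.inr (by rw [h])
            cases rest1 with
            | nil =>
              have ha : afterSep (c :: rest.takeWhile Char.isDigit) [d] =
                  (c :: rest.takeWhile Char.isDigit, []) := by
                simp only [afterSep]
                rw [if_pos hcondT]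
              rw [ha]
              simp only [collectA]
              rw [runsB_cons]
              simp [loopA_nil, scanRuns, headDigit, hd, hc, runsB]
            | cons e rest1' =>
              by_cases he : e.isDigit = true
              · -- attach the separator and the next digit run
                have ha : afterSep (c :: rest.takeWhile Char.isDigit) (d :: e :: rest1') =
                    ((c :: rest.takeWhile Char.isDigit) ++ [d], e :: rest1') := by
                  simp only [afterSep]
                  rw [if_pos hcondT, if_pos he]
                rw [ha, collectA_eq]
                have hrb2 : runsB (d :: e :: rest1') =
                    [d] :: (e :: rest1'.takeWhile Char.isDigit) :: runsB (rest1'.dropWhile Char.isDigit) := by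
                  rw [runsB_cons]
                  rw [List.takeWhile_cons_of_neg (by simp [hd, he])]
                  rw [List.dropWhile_cons_of_neg (by simp [hd, he])]
                  rw [runsB_cons]
                  simp [he]
                rw [hrb2]
                have htw2 : (e :: rest1').takeWhile Char.isDigit = e :: rest1'.takeWhile Char.isDigit := by
                  simp [he]
                have hdw2 : (e :: rest1').dropWhile Char.isDigit = rest1'.dropWhile Char.isDigit := by
                  simp [he]
                rw [htw2, hdw2]
                have hlen2 : (rest1'.dropWhile Char.isDigit).length ≤ n := by
                  have h1 := List.length_dropWhile_le (p := Char.isDigit) (l := rest1')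
                  have h2 : rest1'.length + 2 ≤ rest.length := by
                    have := hseq ▸ hdlen
                    simpa using this
                  omega
                have hih := ih _ hlen2
                -- evaluate scanRuns on the attach shape
                rw [show scanRuns ((c :: rest.takeWhile Char.isDigit) :: [d] ::
                      (e :: rest1'.takeWhile Char.isDigit) :: runsB (rest1'.dropWhile Char.isDigit)) =
                    ((c :: rest.takeWhile Char.isDigit) ++ [d] ++ (e :: rest1'.takeWhile Char.isDigit)) ::
                      scanRuns (runsB (rest1'.dropWhile Char.isDigit)) from by
                  rcases hsep with h | h <;> subst h <;>
                    simp [scanRuns, headDigit, hc, he]]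
                simp [hih, List.append_assoc]
              · -- separator not followed by a digit: A skips it, B's middle run has length ≥ 2
                have hef : e.isDigit = false := by simpa using he
                have ha : afterSep (c :: rest.takeWhile Char.isDigit) (d :: e :: rest1') =
                    (c :: rest.takeWhile Char.isDigit, e :: rest1') := by
                  simp only [afterSep]
                  rw [if_pos hcondT, if_neg (by simp [hef])]
                rw [ha]
                rw [show collectA (c :: rest.takeWhile Char.isDigit) (e :: rest1') =
                    (c :: rest.takeWhile Char.isDigit, e :: rest1') from by
                  simp [collectA, hef]]
                have hlen2 : (e :: rest1').length ≤ n := by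
                  have := hseq ▸ hdlen
                  simp at this ⊢
                  omega
                have hih := ih _ hlen2
                have hrb3 : runsB (d :: e :: rest1') =
                    (d :: e :: rest1'.takeWhile (fun x : Char => x.isDigit == d.isDigit)) ::
                      runsB (rest1'.dropWhile (fun x : Char => x.isDigit == d.isDigit)) := by
                  rw [runsB_cons, List.takeWhile_cons_of_pos (by simp [hd, hef]),
                      List.dropWhile_cons_of_pos (by simp [hd, hef])]
                rw [hrb3]
                rw [scan_cons_noattach _ _ _ hhd (by simp) (by simp)]
                rw [← hrb3]
                rw [scan_skip d (e :: rest1') hd]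
                simp [hih]
          · -- d is not a separator at all
            have hs1 : d ≠ '.' := fun h => hsep (Or.inl h)
            have hs2 : d ≠ ',' := fun h => hsep (Or.inr h)
            have ha : afterSep (c :: rest.takeWhile Char.isDigit) (d :: rest1) =
                (c :: rest.takeWhile Char.isDigit, d :: rest1) := by
              simp only [afterSep]
              rw [if_neg (by rintro (⟨h, _⟩ | ⟨h, _⟩) <;> [exact hs1 h; exact hs2 h])]
            rw [ha]
            rw [show collectA (c :: rest.takeWhile Char.isDigit) (d :: rest1) =
                (c :: rest.takeWhile Char.isDigit, d :: rest1) from by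
              simp [collectA, hd]]
            have hih := ih _ hlen1
            rw [runsB_cons]
            rw [scan_cons_noattach _ _ _ hhd (by simp [hs1]) (by simp [hs2])]
            rw [← runsB_cons]
            simp [hih]

-- ===== VERDICT (by name: the statement is the Claim_ definition above) =====
theorem ChooseNumbers_spec : Claim_equal_ChooseNumbers := by
  intro str _
  unfold Spec_ChooseNumbers ChooseNumbers ChooseNumbers_alt
  rw [main_equiv str.toList.length str.toList le_rfl]
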